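-- pv_equiv track=rewrite | github.com/FlipperMaker/flippermaker.github.io | Tools/test_TouchTunes.py | gen_sub
-- ===== SOURCE A (Python) =====
-- def gen_sub(freq, zerolen, onelen, repeats, pause, bits):
--     res = f"""Filetype: Flipper SubGhz RAW File
-- Version: 1
-- Frequency: {freq}
-- Preset: FuriHalSubGhzPresetOok650Async
-- Protocol: RAW
-- """
--     if pause == 0:
--         # Pause must be non-zero.
--         pause = zerolen
--
--     data = []
--     prevbit = None
--     prevbitlen = 0
--     for bit in bits:
--         if prevbit and prevbit != bit:
--             data.append(prevbitlen)
--             prevbitlen = 0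
--
--         if bit == '1':
--             prevbitlen += onelen
--         else:
--             prevbitlen -= zerolen
--
--         prevbit = bit
--
--     if prevbit == '1':
--         data.append(prevbitlen)
--         data.append(-pause)
--     else:
--         data.append(prevbitlen - pause)
--
--     datalines = []
--     for i in range(0, len(data), 512):
--         batch = [str(n) for n in data[i:i+512]]
--         datalines.append(f'RAW_Data: {" ".join(batch)}')
--     res += '\n'.join(datalines)
--
--     return res
-- ===== SOURCE B (Python) =====
-- def gen_sub(freq, zerolen, onelen, repeats, pause, bits):
--     if pause == 0:
--         # Pause must be non-zero.
--         pause = zerolen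
--
--     # Build the data list back-to-front: seed it with the pause, then walk the
--     # bits in reverse, either extending the run at the front (the last element
--     # of `rev`) or starting a new one; a trailing non-'1' run absorbs the pause.
--     rev = [-pause]
--     cur = None
--     for bit in reversed(bits):
--         step = onelen if bit == '1' else -zerolen
--         if bit == cur or (cur is None and bit != '1'):
--             rev[-1] += step
--         else:
--             rev.append(step)
--         cur = bit
--     data = rev[::-1]
--
--     header = ("Filetype: Flipper SubGhz RAW File\n"
--               "Version: 1\n"
--               f"Frequency: {freq}\n"
--               "Preset: FuriHalSubGhzPresetOok650Async\n"
--               "Protocol: RAW\n")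
--     lines = ['RAW_Data: ' + ' '.join(str(n) for n in data[i:i + 512])
--              for i in range(0, len(data), 512)]
--     return header + '\n'.join(lines)
-- ===== Notes on version B (the rewrite author's own statement) =====
-- stated objective: alternative
-- what changed: B builds the data list back-to-front: it seeds the list with the pause value, walks the bits in reverse extending or starting the front run (stored at the end of a reversed buffer) and letting a trailing non-'1' run absorb the pause naturally, then reverses once - so A's pending-run accumulator, emit-on-change logic and post-loop tail special-casing disappear.
import Mathlib
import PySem

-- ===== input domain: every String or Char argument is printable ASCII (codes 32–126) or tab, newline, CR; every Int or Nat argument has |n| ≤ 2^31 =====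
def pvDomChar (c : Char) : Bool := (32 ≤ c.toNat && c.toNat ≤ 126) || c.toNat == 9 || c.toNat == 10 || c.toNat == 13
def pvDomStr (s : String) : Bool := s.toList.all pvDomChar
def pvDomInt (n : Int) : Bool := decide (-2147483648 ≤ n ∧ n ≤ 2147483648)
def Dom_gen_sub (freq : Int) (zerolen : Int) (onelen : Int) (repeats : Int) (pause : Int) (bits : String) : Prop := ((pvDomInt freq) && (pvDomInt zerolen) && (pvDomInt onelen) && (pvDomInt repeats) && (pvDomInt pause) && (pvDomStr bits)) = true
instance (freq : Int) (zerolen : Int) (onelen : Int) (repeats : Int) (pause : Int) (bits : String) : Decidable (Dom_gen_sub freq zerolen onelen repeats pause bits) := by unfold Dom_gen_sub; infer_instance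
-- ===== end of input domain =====

-- B builds the data list back-to-front (seed the pause, walk the bits in reverse, reverse once),
-- replacing A's pending-run accumulator and post-loop tail special-cases (objective: alternative).

-- ===== PORT A =====
-- loop body of A's 'for bit in bits' (state: data, prevbit, prevbitlen)
def pvStepA (zerolen onelen : Int) (st : List Int × Option Char × Int) (bit : Char) : List Int × Option Char × Int :=
  let s1 : List Int × Int :=
    match st.2.1 with
    | some pb => if pb ≠ bit then (st.1 ++ [st.2.2], 0) else (st.1, st.2.2)
    | none => (st.1, st.2.2)
  let prevbitlen := if bit = '1' then s1.2 + onelen else s1.2 - zerolen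
  (s1.1, some bit, prevbitlen)

def gen_sub (freq : Int) (zerolen : Int) (onelen : Int) (repeats : Int) (pause : Int) (bits : String) : String :=
  let res := "Filetype: Flipper SubGhz RAW File\nVersion: 1\nFrequency: " ++ PySem.Int.toStr freq ++ "\nPreset: FuriHalSubGhzPresetOok650Async\nProtocol: RAW\n"
  let pause := if pause = 0 then zerolen else pause
  let st := bits.toList.foldl (pvStepA zerolen onelen) ([], none, 0)
  let data := if st.2.1 = some '1' then st.1 ++ [st.2.2] ++ [-pause] else st.1 ++ [st.2.2 - pause]
  let datalines := (PySem.List.pyRange 0 (PySem.List.len data) 512).foldl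
      (fun acc i => acc ++ ["RAW_Data: " ++ PySem.Str.join " " ((PySem.List.slice data (some i) (some (i + 512))).map PySem.Int.toStr)]) []
  res ++ PySem.Str.join "\n" datalines

-- ===== PORT B =====
-- loop body of B's 'for bit in reversed(bits)' (state: rev, cur); rev is never empty, so rev[-1] += step is total
def pvStepB (zerolen onelen : Int) (st : List Int × Option Char) (bit : Char) : List Int × Option Char :=
  let step := if bit = '1' then onelen else -zerolen
  if st.2 = some bit ∨ (st.2 = none ∧ bit ≠ '1') then
    (st.1.dropLast ++ [(PySem.List.pyGet? st.1 (-1)).getD 0 + step], some bit)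
  else
    (st.1 ++ [step], some bit)

def gen_sub_alt (freq : Int) (zerolen : Int) (onelen : Int) (repeats : Int) (pause : Int) (bits : String) : String :=
  let pause := if pause = 0 then zerolen else pause
  let fin := bits.toList.reverse.foldl (pvStepB zerolen onelen) ([-pause], none)
  let data := (PySem.List.slice? fin.1 none none (-1)).getD []   -- rev[::-1]
  let header := "Filetype: Flipper SubGhz RAW File\nVersion: 1\nFrequency: " ++ PySem.Int.toStr freq ++ "\nPreset: FuriHalSubGhzPresetOok650Async\nProtocol: RAW\n"
  let lines := (PySem.List.pyRange 0 (PySem.List.len data) 512).map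
      (fun i => "RAW_Data: " ++ PySem.Str.join " " ((PySem.List.slice data (some i) (some (i + 512))).map PySem.Int.toStr))
  header ++ PySem.Str.join "\n" lines

-- ===== PRECONDITION & SPEC =====
def Spec_gen_sub (freq : Int) (zerolen : Int) (onelen : Int) (repeats : Int) (pause : Int) (bits : String) (out : String) : Prop := out = gen_sub_alt freq zerolen onelen repeats pause bits
instance (freq : Int) (zerolen : Int) (onelen : Int) (repeats : Int) (pause : Int) (bits : String) (out : String) : Decidable (Spec_gen_sub freq zerolen onelen repeats pause bits out) := by unfold Spec_gen_sub; infer_instance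

-- ===== CLAIM (what is proved, stated in full; the proofs are below) =====
def Claim_equal_gen_sub : Prop := ∀ (freq : Int) (zerolen : Int) (onelen : Int) (repeats : Int) (pause : Int) (bits : String), Dom_gen_sub freq zerolen onelen repeats pause bits → Spec_gen_sub freq zerolen onelen repeats pause bits (gen_sub freq zerolen onelen repeats pause bits)

-- ===== LEMMAS AND PROOFS =====

-- A's tail logic applied to A's final loop state
def pvTail (pause : Int) (st : List Int × Option Char × Int) : List Int :=
  if st.2.1 = some '1' then st.1 ++ [st.2.2] ++ [-pause] else st.1 ++ [st.2.2 - pause]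

-- A's data list as a function of the bit list
def pvAfin (zerolen onelen pause : Int) (l : List Char) : List Int :=
  pvTail pause (l.foldl (pvStepA zerolen onelen) ([], none, 0))

def pvS (zerolen onelen : Int) (c : Char) : Int := if c = '1' then onelen else -zerolen

def pvAddHead (s : Int) : List Int → List Int
  | [] => []
  | h :: tl => (h + s) :: tl

def pvBump (s : Int) : List Int × Option Char × Int → List Int × Option Char × Int
  | ([], pb, len) => ([], pb, len + s)
  | (h :: tl, pb, len) => ((h + s) :: tl, pb, len)

-- unfoldings of A's loop body in its three cases
theorem pvStepA_none (zerolen onelen : Int) (data : List Int) (len : Int) (b : Char) :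
    pvStepA zerolen onelen (data, none, len) b =
      (data, some b, if b = '1' then len + onelen else len - zerolen) := by
  simp [pvStepA]

theorem pvStepA_eq (zerolen onelen : Int) (data : List Int) (len : Int) (b : Char) :
    pvStepA zerolen onelen (data, some b, len) b =
      (data, some b, if b = '1' then len + onelen else len - zerolen) := by
  simp [pvStepA]

theorem pvStepA_ne (zerolen onelen : Int) (data : List Int) (len : Int) {p b : Char} (h : p ≠ b) :
    pvStepA zerolen onelen (data, some p, len) b =
      (data ++ [len], some b, if b = '1' then 0 + onelen else 0 - zerolen) := by
  simp [pvStepA, h]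

theorem pvS_eq (zerolen onelen : Int) (c : Char) :
    (if c = '1' then 0 + onelen else 0 - zerolen) = pvS zerolen onelen c := by
  by_cases hc : c = '1' <;> simp [pvS, hc]

-- A's loop only appends to data
theorem pvFoldA_data (zerolen onelen : Int) (t : List Char) : ∀ (data : List Int) (pb : Option Char) (len : Int),
    t.foldl (pvStepA zerolen onelen) (data, pb, len) =
    ((data ++ (t.foldl (pvStepA zerolen onelen) ([], pb, len)).1),
     (t.foldl (pvStepA zerolen onelen) ([], pb, len)).2) := by
  induction t with
  | nil => intro data pb len; simp
  | cons b t ih =>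
      intro data pb len
      simp only [List.foldl_cons]
      cases pb with
      | none =>
          rw [pvStepA_none, pvStepA_none]
          exact ih data (some b) _
      | some p =>
          by_cases hpb : p = b
          · subst hpb
            rw [pvStepA_eq, pvStepA_eq]
            exact ih data (some p) _
          · rw [pvStepA_ne zerolen onelen data len hpb, pvStepA_ne zerolen onelen [] len hpb]
            rw [ih (data ++ [len]) (some b) _, ih ([] ++ [len]) (some b) _]
            simp

-- shifting the pending run value shifts the first emitted value
theorem pvFoldA_bump (zerolen onelen : Int) (t : List Char) : ∀ (c : Char) (x s : Int),
    t.foldl (pvStepA zerolen onelen) ([], some c, x + s) =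
    pvBump s (t.foldl (pvStepA zerolen onelen) ([], some c, x)) := by
  induction t with
  | nil => intro c x s; simp [pvBump]
  | cons b t ih =>
      intro c x s
      simp only [List.foldl_cons]
      by_cases hbc : c = b
      · subst hbc
        rw [pvStepA_eq, pvStepA_eq]
        by_cases hb : c = '1'
        · rw [if_pos hb, if_pos hb]
          have h : x + s + onelen = (x + onelen) + s := by ring
          rw [h]; exact ih c (x + onelen) s
        · rw [if_neg hb, if_neg hb]
          have h : x + s - zerolen = (x - zerolen) + s := by ring
          rw [h]; exact ih c (x - zerolen) s
      · rw [pvStepA_ne zerolen onelen [] (x + s) hbc, pvStepA_ne zerolen onelen [] x hbc]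
        simp only [List.nil_append]
        rw [pvFoldA_data zerolen onelen t [x + s] (some b) _,
            pvFoldA_data zerolen onelen t [x] (some b) _]
        rcases hY : (t.foldl (pvStepA zerolen onelen) ([], some b,
            if b = '1' then 0 + onelen else 0 - zerolen)) with ⟨d, pb2, len2⟩
        simp [pvBump]

theorem pvTail_bump (pause s : Int) (st : List Int × Option Char × Int) :
    pvTail pause (pvBump s st) = pvAddHead s (pvTail pause st) := by
  rcases st with ⟨d, pb, len⟩
  cases d with
  | nil =>
      by_cases h : pb = some '1' <;>
        simp [pvTail, pvBump, pvAddHead, h] <;> ring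
  | cons h0 tl =>
      by_cases h : pb = some '1' <;>
        simp [pvTail, pvBump, pvAddHead, h]

theorem pvTail_cons (pause x : Int) (d : List Int) (pb : Option Char) (len : Int) :
    pvTail pause (x :: d, pb, len) = x :: pvTail pause (d, pb, len) := by
  by_cases h : pb = some '1' <;> simp [pvTail, h]

theorem pvAfin_nil (zerolen onelen pause : Int) :
    pvAfin zerolen onelen pause [] = [-pause] := by
  simp [pvAfin, pvTail]

theorem pvAfin_single (zerolen onelen pause : Int) (c : Char) :
    pvAfin zerolen onelen pause [c] =
      if c = '1' then [onelen, -pause] else [-zerolen - pause] := by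
  by_cases hc : c = '1' <;> simp [pvAfin, pvStepA, pvTail, hc]

theorem pvAfin_merge (zerolen onelen pause : Int) (c : Char) (t : List Char) :
    pvAfin zerolen onelen pause (c :: c :: t) =
      pvAddHead (pvS zerolen onelen c) (pvAfin zerolen onelen pause (c :: t)) := by
  unfold pvAfin
  simp only [List.foldl_cons]
  rw [pvStepA_none, pvS_eq, pvStepA_eq]
  have h2 : (if c = '1' then pvS zerolen onelen c + onelen else pvS zerolen onelen c - zerolen)
      = pvS zerolen onelen c + pvS zerolen onelen c := by
    by_cases hc : c = '1' <;> simp [pvS, hc] <;> ring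
  rw [h2, pvFoldA_bump zerolen onelen t c (pvS zerolen onelen c) (pvS zerolen onelen c),
      pvTail_bump]

theorem pvAfin_switch (zerolen onelen pause : Int) (c d : Char) (t : List Char) (h : c ≠ d) :
    pvAfin zerolen onelen pause (c :: d :: t) =
      pvS zerolen onelen c :: pvAfin zerolen onelen pause (d :: t) := by
  unfold pvAfin
  simp only [List.foldl_cons]
  rw [pvStepA_none, pvS_eq, pvStepA_ne zerolen onelen [] (pvS zerolen onelen c) h,
      pvStepA_none, pvS_eq]
  simp only [List.nil_append]
  rw [pvFoldA_data zerolen onelen t [pvS zerolen onelen c] (some d) _]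
  generalize (t.foldl (pvStepA zerolen onelen) ([], some d, pvS zerolen onelen d)) = Y
  obtain ⟨dd, pb2, len2⟩ := Y
  simpa using pvTail_cons pause (pvS zerolen onelen c) dd pb2 len2

theorem pvAfin_ne_nil (zerolen onelen pause : Int) (l : List Char) :
    pvAfin zerolen onelen pause l ≠ [] := by
  unfold pvAfin pvTail
  rcases l.foldl (pvStepA zerolen onelen) ([], none, 0) with ⟨d, pb, len⟩
  by_cases h : pb = some '1' <;> simp [h]

-- rev[-1] += s on a reversed nonempty list is pvAddHead on the original
theorem pvRevAddLast (s : Int) (x : List Int) (hx : x ≠ []) :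
    (x.reverse.dropLast ++ [(PySem.List.pyGet? x.reverse (-1)).getD 0 + s]) =
      (pvAddHead s x).reverse := by
  rcases x with _ | ⟨h, tl⟩
  · exact absurd rfl hx
  · simp [PySem.List.pyGet?_neg_one_append_singleton, pvAddHead]

-- B's reverse pass computes A's data list (reversed) plus the first bit
theorem pvFoldB (zerolen onelen pause : Int) (l : List Char) :
    l.foldr (fun c st => pvStepB zerolen onelen st c) ([-pause], none) =
      ((pvAfin zerolen onelen pause l).reverse, l.head?) := by
  induction l with
  | nil => simp [pvAfin_nil]
  | cons c t ih =>
      rw [List.foldr_cons, ih]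
      cases t with
      | nil =>
          by_cases hc : c = '1'
          · simp [pvStepB, pvAfin_nil, pvAfin_single, hc]
          · simp [pvStepB, pvAfin_nil, pvAfin_single, hc,
              PySem.List.pyGet?, PySem.List.pyIdx?]
            ring_nf
      | cons d t' =>
          by_cases hcd : c = d
          · subst hcd
            have hcond : (pvStepB zerolen onelen
                ((pvAfin zerolen onelen pause (c :: t')).reverse, (c :: t').head?) c) =
                (((pvAfin zerolen onelen pause (c :: t')).reverse).dropLast ++
                  [(PySem.List.pyGet? (pvAfin zerolen onelen pause (c :: t')).reverse (-1)).getD 0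
                    + pvS zerolen onelen c], some c) := by
              simp [pvStepB, pvS]
            rw [hcond, pvRevAddLast _ _ (pvAfin_ne_nil _ _ _ _), ← pvAfin_merge]
            simp
          · have hcond : (pvStepB zerolen onelen
                ((pvAfin zerolen onelen pause (d :: t')).reverse, (d :: t').head?) c) =
                ((pvAfin zerolen onelen pause (d :: t')).reverse ++ [pvS zerolen onelen c], some c) := by
              have hdc : d ≠ c := fun h => hcd h.symm
              simp [pvStepB, pvS, hdc]
            rw [hcond, ← List.reverse_cons, ← pvAfin_switch zerolen onelen pause c d t' hcd]
            simp

-- ===== VERDICT (by name: the statement is the Claim_ definition above) =====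
theorem gen_sub_spec : Claim_equal_gen_sub := by
  intro freq zerolen onelen repeats pause bits _
  unfold Spec_gen_sub gen_sub gen_sub_alt
  have hfold : bits.toList.reverse.foldl (pvStepB zerolen onelen)
      ([-(if pause = 0 then zerolen else pause)], none) =
      ((pvAfin zerolen onelen (if pause = 0 then zerolen else pause) bits.toList).reverse,
        bits.toList.head?) := by
    rw [List.foldl_reverse]
    exact pvFoldB zerolen onelen (if pause = 0 then zerolen else pause) bits.toList
  have hdata : (PySem.List.slice? ((bits.toList.reverse.foldl (pvStepB zerolen onelen)
      ([-(if pause = 0 then zerolen else pause)], none)).1) none none (-1)).getD [] =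
      pvAfin zerolen onelen (if pause = 0 then zerolen else pause) bits.toList := by
    rw [hfold, PySem.List.slice?_none_none_neg_one]
    simp
  have hAdata : (if (bits.toList.foldl (pvStepA zerolen onelen) ([], none, 0)).2.1 = some '1' then
      (bits.toList.foldl (pvStepA zerolen onelen) ([], none, 0)).1 ++
        [(bits.toList.foldl (pvStepA zerolen onelen) ([], none, 0)).2.2] ++
        [-(if pause = 0 then zerolen else pause)]
    else
      (bits.toList.foldl (pvStepA zerolen onelen) ([], none, 0)).1 ++
        [(bits.toList.foldl (pvStepA zerolen onelen) ([], none, 0)).2.2 -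
          (if pause = 0 then zerolen else pause)]) =
      pvAfin zerolen onelen (if pause = 0 then zerolen else pause) bits.toList := by
    unfold pvAfin pvTail
    rfl
  simp only [hdata, hAdata, PySem.List.foldl_append_singleton_eq_map, List.nil_append]
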